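-- pv_equiv track=rewrite | github.com/OlgaTora/Algorithm-training-Yandex5.0 | Binary_search/32.py | get_ship_size
-- ===== SOURCE A (Python) =====
-- def get_ship_size(k):
--     def check_size(num):
--         condition = num * (num + 1) * (num + 2) // 6
--         return True if condition + num * (num + 1) // 2 - 1 <= k else False
--
--     l, r = 0, k
--     while l < r:
--         num = (l + r + 1) // 2
--         if check_size(num):
--             l = num
--         else:
--             r = num - 1
--     return l
-- ===== SOURCE B (Python) =====
-- def get_ship_size(k):
--     def fits(num):
--         return num * (num + 1) * (num + 5) // 6 - 1 <= k
--     num = 0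
--     while num < k and fits(num + 1):
--         num += 1
--     return num
-- ===== Notes on version B (the rewrite author's own statement) =====
-- stated objective: simpler
-- what changed: Replaces the binary search over [0,k] with a forward linear scan that increments num while the next size still fits, testing feasibility with a single combined closed-form cubic floor division instead of two separate ones.
import Mathlib
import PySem

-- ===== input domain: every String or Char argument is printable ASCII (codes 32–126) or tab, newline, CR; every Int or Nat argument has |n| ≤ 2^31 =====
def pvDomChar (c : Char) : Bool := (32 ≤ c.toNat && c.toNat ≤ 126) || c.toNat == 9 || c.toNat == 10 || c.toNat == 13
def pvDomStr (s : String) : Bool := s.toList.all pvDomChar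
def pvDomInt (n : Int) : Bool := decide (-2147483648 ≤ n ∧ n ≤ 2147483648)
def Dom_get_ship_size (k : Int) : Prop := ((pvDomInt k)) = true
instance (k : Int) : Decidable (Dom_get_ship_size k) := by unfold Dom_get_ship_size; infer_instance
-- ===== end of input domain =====

-- B replaces A's binary search over [0, k] by a forward scan that increments num while
-- the next size still fits, testing with a single combined cubic formula; objective: simpler.

-- ===== PORT A =====
-- inner helper check_size of A
def pvCheckSize (k num : Int) : Bool :=
  let condition := PySem.Int.floordiv (num * (num + 1) * (num + 2)) 6
  if condition + PySem.Int.floordiv (num * (num + 1)) 2 - 1 ≤ k then true else false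

-- the while loop of A over state (l, r)
def pvALoop (k l r : Int) : Int :=
  if h : l < r then
    let num := PySem.Int.floordiv (l + r + 1) 2
    if pvCheckSize k num then pvALoop k num r else pvALoop k l (num - 1)
  else l
termination_by (r - l).toNat
decreasing_by
  · have e : l + 1 + r = l + r + 1 := by ring
    have hb := PySem.Int.floordiv_two_mid_bounds (lo := l + 1) (hi := r) (by omega)
    rw [e] at hb; omega
  · have e : l + 1 + r = l + r + 1 := by ring
    have hb := PySem.Int.floordiv_two_mid_bounds (lo := l + 1) (hi := r) (by omega)
    rw [e] at hb; omega

def get_ship_size (k : Int) : Int := pvALoop k 0 k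

-- ===== PORT B =====
-- inner helper fits of B
def pvFits (k num : Int) : Bool :=
  PySem.Int.floordiv (num * (num + 1) * (num + 5)) 6 - 1 ≤ k

-- the while loop of B over state num
def pvBLoop (k num : Int) : Int :=
  if h : num < k then
    if pvFits k (num + 1) then pvBLoop k (num + 1) else num
  else num
termination_by (k - num).toNat
decreasing_by omega

def get_ship_size_alt (k : Int) : Int := pvBLoop k 0

-- ===== PRECONDITION & SPEC =====
def Spec_get_ship_size (k : Int) (out : Int) : Prop := out = get_ship_size_alt k
instance (k : Int) (out : Int) : Decidable (Spec_get_ship_size k out) := by unfold Spec_get_ship_size; infer_instance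

-- ===== CLAIM (what is proved, stated in full; the proofs are below) =====
def Claim_equal_get_ship_size : Prop := ∀ (k : Int), Dom_get_ship_size k → Spec_get_ship_size k (get_ship_size k)

-- ===== LEMMAS AND PROOFS =====

-- the shared mathematical predicate: num is a feasible ship size for k
def pvQ (k n : Int) : Prop := n * (n + 1) * (n + 5) ≤ 6 * (k + 1)

lemma pv_dvd6A (n : Int) : (6 : Int) ∣ n * (n + 1) * (n + 2) := by
  have h : ((n * (n + 1) * (n + 2) : Int) : ZMod 6) = 0 := by
    push_cast
    have : ∀ m : ZMod 6, m * (m + 1) * (m + 2) = 0 := by decide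
    exact this _
  exact (ZMod.intCast_zmod_eq_zero_iff_dvd _ 6).mp h

lemma pv_dvd2 (n : Int) : (2 : Int) ∣ n * (n + 1) := by
  have h : ((n * (n + 1) : Int) : ZMod 2) = 0 := by
    push_cast
    have : ∀ m : ZMod 2, m * (m + 1) = 0 := by decide
    exact this _
  exact (ZMod.intCast_zmod_eq_zero_iff_dvd _ 2).mp h

lemma pv_dvd6B (n : Int) : (6 : Int) ∣ n * (n + 1) * (n + 5) := by
  have h : ((n * (n + 1) * (n + 5) : Int) : ZMod 6) = 0 := by
    push_cast
    have : ∀ m : ZMod 6, m * (m + 1) * (m + 5) = 0 := by decide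
    exact this _
  exact (ZMod.intCast_zmod_eq_zero_iff_dvd _ 6).mp h

lemma pv_floordiv_exact (a q b : Int) (hb : 0 < b) (h : a = b * q) :
    PySem.Int.floordiv a b = q := by
  rw [PySem.Int.floordiv_eq_iff_of_pos hb]
  constructor <;> nlinarith

lemma pvCheckSize_iff (k n : Int) : pvCheckSize k n = true ↔ pvQ k n := by
  obtain ⟨q1, h1⟩ := pv_dvd6A n
  obtain ⟨q2, h2⟩ := pv_dvd2 n
  unfold pvCheckSize pvQ
  rw [pv_floordiv_exact _ q1 6 (by norm_num) h1,
      pv_floordiv_exact _ q2 2 (by norm_num) h2]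
  have key : n * (n + 1) * (n + 5) = 6 * q1 + 6 * q2 := by nlinarith
  constructor
  · intro h
    have : q1 + q2 - 1 ≤ k := by by_contra hc; simp [hc] at h
    omega
  · intro h
    have : q1 + q2 - 1 ≤ k := by omega
    simp [this]

lemma pvFits_iff (k n : Int) : pvFits k n = true ↔ pvQ k n := by
  obtain ⟨q, hq⟩ := pv_dvd6B n
  unfold pvFits pvQ
  rw [pv_floordiv_exact _ q 6 (by norm_num) hq]
  constructor
  · intro h
    have : q - 1 ≤ k := by exact_mod_cast of_decide_eq_true h
    omega
  · intro h
    have : q - 1 ≤ k := by omega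
    exact decide_eq_true this

lemma pvQ_mono (k m n : Int) (hm : 0 ≤ m) (hmn : m ≤ n) (h : pvQ k n) : pvQ k m := by
  unfold pvQ at *
  have h0 : 0 ≤ n - m := by omega
  have hn : 0 ≤ n := by omega
  nlinarith [mul_nonneg (mul_nonneg h0 hm) hn, mul_nonneg (mul_nonneg h0 hm) hm,
    mul_nonneg (mul_nonneg h0 hn) hn, mul_nonneg h0 hm, mul_nonneg h0 hn]

lemma pvQ_gt_k (k m : Int) (hk : 1 ≤ k) (hm : k < m) : ¬ pvQ k m := by
  unfold pvQ
  have h2 : 2 ≤ m := by omega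
  intro h
  nlinarith [mul_nonneg (show (0:Int) ≤ m - 2 by omega) (sq_nonneg m), sq_nonneg m, sq_nonneg (m - 2)]

-- A's loop computes the greatest feasible value
lemma pvALoop_spec (k : Int) : ∀ fn : Nat, ∀ l r : Int, (r - l).toNat = fn →
    0 ≤ l → l ≤ r → pvQ k l → (∀ m, r < m → ¬ pvQ k m) →
    pvQ k (pvALoop k l r) ∧ ∀ m, pvALoop k l r < m → ¬ pvQ k m := by
  intro fn
  induction fn using Nat.strong_induction_on with
  | _ fn ih =>
    intro l r hfn hl0 hlr hQl hub
    rw [pvALoop]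
    by_cases h : l < r
    · simp only [h, dif_pos]
      have e : l + 1 + r = l + r + 1 := by ring
      have hb := PySem.Int.floordiv_two_mid_bounds (lo := l + 1) (hi := r) (by omega)
      rw [e] at hb
      set num := PySem.Int.floordiv (l + r + 1) 2 with hnum
      by_cases hc : pvCheckSize k num = true
      · simp only [hc, if_pos]
        exact ih (r - num).toNat (by omega) num r rfl (by omega) (by omega)
          ((pvCheckSize_iff k num).mp hc) hub
      · simp only [hc, if_neg, Bool.not_eq_true]
        have hnQ : ¬ pvQ k num := fun hq => hc ((pvCheckSize_iff k num).mpr hq)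
        refine ih (num - 1 - l).toNat (by omega) l (num - 1) rfl hl0 (by omega) hQl ?_
        intro m hm hQm
        exact hnQ (pvQ_mono k num m (by omega) (by omega) hQm)
    · simp only [h, dif_neg, not_false_iff]
      have : l = r := by omega
      exact ⟨hQl, fun m hm => hub m (by omega)⟩

-- B's loop computes the greatest feasible value (for k ≥ 1)
lemma pvBLoop_spec (k : Int) (hk : 1 ≤ k) : ∀ fn : Nat, ∀ num : Int, (k - num).toNat = fn →
    0 ≤ num → num ≤ k → pvQ k num →
    pvQ k (pvBLoop k num) ∧ ∀ m, pvBLoop k num < m → ¬ pvQ k m := by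
  intro fn
  induction fn using Nat.strong_induction_on with
  | _ fn ih =>
    intro num hfn h0 hnk hQ
    rw [pvBLoop]
    by_cases h : num < k
    · simp only [h, dif_pos]
      by_cases hf : pvFits k (num + 1) = true
      · simp only [hf, if_pos]
        exact ih (k - (num + 1)).toNat (by omega) (num + 1) rfl (by omega) (by omega)
          ((pvFits_iff k (num + 1)).mp hf)
      · simp only [hf, if_neg, Bool.not_eq_true]
        have hnQ : ¬ pvQ k (num + 1) := fun hq => hf ((pvFits_iff k (num + 1)).mpr hq)
        refine ⟨hQ, fun m hm hQm => hnQ (pvQ_mono k (num + 1) m (by omega) (by omega) hQm)⟩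
    · simp only [h, dif_neg, not_false_iff]
      have hnk' : num = k := by omega
      refine ⟨hQ, fun m hm hQm => pvQ_gt_k k m hk (by omega) hQm⟩

-- ===== VERDICT (by name: the statement is the Claim_ definition above) =====
theorem get_ship_size_spec : Claim_equal_get_ship_size := by
  intro k _
  show get_ship_size k = get_ship_size_alt k
  unfold get_ship_size get_ship_size_alt
  by_cases hk : k < 1
  · rw [pvALoop, pvBLoop]
    simp [show ¬ ((0:Int) < k) from by omega]
  · push Not at hk
    have hQ0 : pvQ k 0 := by unfold pvQ; nlinarith
    obtain ⟨ha1, ha2⟩ := pvALoop_spec k (k - 0).toNat 0 k rfl le_rfl (by omega) hQ0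
      (fun m hm => pvQ_gt_k k m hk hm)
    obtain ⟨hb1, hb2⟩ := pvBLoop_spec k hk (k - 0).toNat 0 rfl le_rfl (by omega) hQ0
    by_contra hne
    rcases lt_or_gt_of_ne hne with h | h
    · exact ha2 _ h hb1
    · exact hb2 _ h ha1
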